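-- pv_equiv track=rewrite | github.com/Kidder1/nic | src/nic/cli.py | first_ipv6
-- ===== SOURCE A (Python) =====
-- from typing import Optional
--
-- def first_ipv6(info: dict) -> Optional[dict]:
--     non_local = []
--     link_local = []
--     for item in info.get("ipv6", []):
--         address = item["address"]
--         if address == "::1":
--             continue
--         if address.startswith("fe80::"):
--             link_local.append(item)
--         else:
--             non_local.append(item)
--     return (non_local or link_local or [None])[0]
-- ===== SOURCE B (Python) =====
-- from typing import Optional
--
-- def first_ipv6(info: dict) -> Optional[dict]:
--     items = [item for item in info.get("ipv6", []) if item["address"] != "::1"]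
--     return next((i for i in items if not i["address"].startswith("fe80::")),
--                 next((i for i in items if i["address"].startswith("fe80::")), None))
-- ===== Notes on version B (the rewrite author's own statement) =====
-- stated objective: idiomatic
-- what changed: B replaces A's two-list partition-then-index with a single '::1' filter followed by two ordered searches (next over generators): find the first non-link-local entry, falling back to the first link-local one.
-- outside the precondition, e.g. on first_ipv6({'ipv6': [{}]}): A raises KeyError, B raises KeyError
import Mathlib
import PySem

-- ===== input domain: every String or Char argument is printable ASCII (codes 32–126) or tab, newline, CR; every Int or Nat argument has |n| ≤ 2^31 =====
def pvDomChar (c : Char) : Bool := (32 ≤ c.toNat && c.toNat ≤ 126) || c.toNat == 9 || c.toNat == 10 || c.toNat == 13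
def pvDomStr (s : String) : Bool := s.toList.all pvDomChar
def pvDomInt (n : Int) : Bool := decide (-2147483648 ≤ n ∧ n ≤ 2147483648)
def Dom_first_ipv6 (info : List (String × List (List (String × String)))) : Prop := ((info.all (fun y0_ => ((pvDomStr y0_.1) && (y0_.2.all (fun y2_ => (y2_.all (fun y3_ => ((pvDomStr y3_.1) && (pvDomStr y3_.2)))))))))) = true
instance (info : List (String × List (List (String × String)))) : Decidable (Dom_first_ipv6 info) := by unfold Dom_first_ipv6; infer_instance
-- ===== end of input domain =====

-- B restates the search idiomatically (filter '::1' away, then first non-link-local else first link-local) instead of partitioning into two lists and indexing [0].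

-- dict lookup on an association list: first match (Python dict semantics)
def pyLookup? {ν : Type} (d : List (String × ν)) (k : String) : Option ν :=
  (d.find? (fun kv => kv.1 == k)).map (·.2)

-- item["address"]: exact under Pre_first_ipv6, which guarantees the key is present
def pvAddr (item : List (String × String)) : String := (pyLookup? item "address").getD ""

-- the body of A's for-loop
def pvStep (acc : List (List (String × String)) × List (List (String × String)))
    (item : List (String × String)) :
    List (List (String × String)) × List (List (String × String)) :=
  if pvAddr item = "::1" then acc
  else if PySem.Str.startswith (pvAddr item) "fe80::" then (acc.1, acc.2 ++ [item])
  else (acc.1 ++ [item], acc.2)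

-- ===== PORT A =====
def first_ipv6 (info : List (String × List (List (String × String)))) : Option (List (String × String)) :=
  let p := ((pyLookup? info "ipv6").getD []).foldl pvStep ([], [])
  match p.1 with
  | item :: _ => some item
  | [] =>
    match p.2 with
    | item :: _ => some item
    | [] => none

-- ===== PORT B =====
def first_ipv6_alt (info : List (String × List (List (String × String)))) : Option (List (String × String)) :=
  let items := ((pyLookup? info "ipv6").getD []).filter (fun i => pvAddr i ≠ "::1")
  let dflt := items.find? (fun i => PySem.Str.startswith (pvAddr i) "fe80::")
  match items.find? (fun i => !PySem.Str.startswith (pvAddr i) "fe80::") with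
  | some i => some i
  | none => dflt

-- ===== PRECONDITION & SPEC =====
-- Pre_ excludes exactly the inputs where Python A raises KeyError: an entry of the "ipv6" list without an "address" key.
def Pre_first_ipv6 (info : List (String × List (List (String × String)))) : Prop :=
  ∀ item ∈ (pyLookup? info "ipv6").getD [], (pyLookup? item "address").isSome = true
instance (info : List (String × List (List (String × String)))) : Decidable (Pre_first_ipv6 info) := by unfold Pre_first_ipv6; infer_instance
def pvWitness_first_ipv6 : (List (String × List (List (String × String)))) :=
  [("ipv6", [[("address", "::1")], [("address", "fe80::1")], [("address", "2001:db8::1")]])]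
def Spec_first_ipv6 (info : List (String × List (List (String × String)))) (out : Option (List (String × String))) : Prop := out = first_ipv6_alt info
instance (info : List (String × List (List (String × String)))) (out : Option (List (String × String))) : Decidable (Spec_first_ipv6 info out) := by unfold Spec_first_ipv6; infer_instance

-- ===== CLAIM (what is proved, stated in full; the proofs are below) =====
def Claim_equal_first_ipv6 : Prop := ∀ (info : List (String × List (List (String × String)))), Dom_first_ipv6 info → Pre_first_ipv6 info → Spec_first_ipv6 info (first_ipv6 info)

-- ===== LEMMAS AND PROOFS =====

-- A's loop partitions the entries into (non-link-local, link-local), each in input order.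
lemma first_ipv6_loop_eq (xs nl ll : List (List (String × String))) :
    xs.foldl pvStep (nl, ll)
    = (nl ++ xs.filter (fun i => decide (pvAddr i ≠ "::1") && !PySem.Str.startswith (pvAddr i) "fe80::"),
       ll ++ xs.filter (fun i => decide (pvAddr i ≠ "::1") && PySem.Str.startswith (pvAddr i) "fe80::")) := by
  induction xs generalizing nl ll with
  | nil => simp
  | cons x xs ih =>
    rw [List.foldl_cons, ih]
    by_cases h1 : pvAddr x = "::1"
    · simp [pvStep, h1]
    · by_cases h2 : PySem.Str.startswith (pvAddr x) "fe80::" = true <;>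
        simp at h2 <;> simp [pvStep, h1, h2]

-- B's two ordered searches over the filtered list equal A's partition-then-index.
lemma first_ipv6_branch_eq (xs : List (List (String × String))) :
    (match (xs.filter (fun i => pvAddr i ≠ "::1")).find? (fun i => !PySem.Str.startswith (pvAddr i) "fe80::") with
     | some i => some i
     | none => (xs.filter (fun i => pvAddr i ≠ "::1")).find? (fun i => PySem.Str.startswith (pvAddr i) "fe80::"))
    = (match xs.filter (fun i => decide (pvAddr i ≠ "::1") && !PySem.Str.startswith (pvAddr i) "fe80::") with
       | i :: _ => some i
       | [] => match xs.filter (fun i => decide (pvAddr i ≠ "::1") && PySem.Str.startswith (pvAddr i) "fe80::") with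
               | i :: _ => some i
               | [] => none) := by
  rw [← List.head?_filter, ← List.head?_filter, List.filter_filter, List.filter_filter]
  rw [List.filter_congr (l := xs) (q := fun i => decide (pvAddr i ≠ "::1") && !PySem.Str.startswith (pvAddr i) "fe80::") (fun a _ => Bool.and_comm _ _)]
  rw [List.filter_congr (l := xs) (q := fun i => decide (pvAddr i ≠ "::1") && PySem.Str.startswith (pvAddr i) "fe80::") (fun a _ => Bool.and_comm _ _)]
  rcases h1 : xs.filter (fun i => decide (pvAddr i ≠ "::1") && !PySem.Str.startswith (pvAddr i) "fe80::") with _ | ⟨a, as⟩ <;>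
  rcases h2 : xs.filter (fun i => decide (pvAddr i ≠ "::1") && PySem.Str.startswith (pvAddr i) "fe80::") with _ | ⟨b, bs⟩ <;> rfl

-- ===== VERDICT (by name: the statement is the Claim_ definition above) =====
theorem first_ipv6_spec : Claim_equal_first_ipv6 := by
  intro info _ _
  show first_ipv6 info = first_ipv6_alt info
  simp only [first_ipv6, first_ipv6_alt, first_ipv6_loop_eq, List.nil_append]
  exact (first_ipv6_branch_eq _).symm
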